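-- pv_equiv track=rewrite | github.com/Agus-DS/Lic-Ciencia-Datos-Intro-Programacion | guia7.py | filas_ordenadas
-- ===== SOURCE A (Python) =====
-- def ordenados(lista:list[int]) -> bool:
--     orden = True
--     indice = 0
--     if not lista:
--         orden = True
--         return orden
--
--     elemento = lista[0]
--
--     while indice < len(lista):
--         for i in range(len(lista)):
--             if elemento > lista[i]:
--                 orden = False
--             elemento = lista[i]
--             indice +=1
--     return orden
--
-- def filas_ordenadas(matriz:list[list[int]]) -> list[bool]:
--     fila_ordenada = []
--     for f in matriz:
--         if ordenados(f):
--             fila_ordenada.append(True)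
--         else:
--             fila_ordenada.append(False)
--
--     return fila_ordenada
-- ===== SOURCE B (Python) =====
-- def filas_ordenadas(matriz: list[list[int]]) -> list[bool]:
--     return [sorted(f) == f for f in matriz]
-- ===== Notes on version B (the rewrite author's own statement) =====
-- stated objective: idiomatic
-- what changed: Replaces the index-juggling while/for consecutive scan with a one-line comprehension that compares each row to its sorted copy.
import Mathlib
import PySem

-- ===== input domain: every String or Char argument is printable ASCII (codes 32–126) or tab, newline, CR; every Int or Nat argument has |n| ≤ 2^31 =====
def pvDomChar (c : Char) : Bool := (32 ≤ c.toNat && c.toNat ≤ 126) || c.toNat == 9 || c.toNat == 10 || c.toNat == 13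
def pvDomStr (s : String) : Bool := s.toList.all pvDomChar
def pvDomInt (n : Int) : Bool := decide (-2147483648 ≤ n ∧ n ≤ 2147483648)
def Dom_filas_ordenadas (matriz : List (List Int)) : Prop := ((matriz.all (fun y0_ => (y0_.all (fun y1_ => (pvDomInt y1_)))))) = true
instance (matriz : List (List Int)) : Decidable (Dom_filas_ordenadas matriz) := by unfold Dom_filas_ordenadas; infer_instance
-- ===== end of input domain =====

-- B replaces A's index-juggling while/for consecutive scan with a comprehension comparing
-- each row to its sorted copy (idiomatic; equivalence is exact).

-- ===== PORT A =====
-- the inner 'for i in range(len(lista))' loop, over state (orden, elemento, indice)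
def pvInnerFor (lista : List Int) (s : Bool × Int × Nat) : Bool × Int × Nat :=
  lista.foldl (fun s x => ((if s.2.1 > x then false else s.1), x, s.2.2 + 1)) s

-- termination helper, cited by pvWhileA's decreasing_by
theorem pvInnerFor_idx (lista : List Int) (s : Bool × Int × Nat) :
    (pvInnerFor lista s).2.2 = s.2.2 + lista.length := by
  induction lista generalizing s with
  | nil => simp [pvInnerFor]
  | cons x t ih =>
    simp only [pvInnerFor, List.foldl, List.length_cons] at ih ⊢
    rw [ih]; simp; omega

-- the 'while indice < len(lista)' loop
def pvWhileA (lista : List Int) (orden : Bool) (indice : Nat) (elemento : Int) : Bool :=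
  if _h : indice < lista.length then
    let s := pvInnerFor lista (orden, elemento, indice)
    pvWhileA lista s.1 s.2.2 s.2.1
  else orden
termination_by lista.length - indice
decreasing_by
  have := pvInnerFor_idx lista (orden, elemento, indice)
  simp only at this; omega

def ordenados (lista : List Int) : Bool :=
  match lista with
  | [] => true
  | x :: _ => pvWhileA lista true 0 x

def filas_ordenadas (matriz : List (List Int)) : List Bool :=
  matriz.foldl (fun acc f => acc ++ [if ordenados f then true else false]) []

-- ===== PORT B =====
def filas_ordenadas_alt (matriz : List (List Int)) : List Bool :=
  matriz.map (fun f => PySem.List.sorted f (fun x => x) false == f)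

-- ===== PRECONDITION & SPEC =====
def Spec_filas_ordenadas (matriz : List (List Int)) (out : List Bool) : Prop := out = filas_ordenadas_alt matriz
instance (matriz : List (List Int)) (out : List Bool) : Decidable (Spec_filas_ordenadas matriz out) := by unfold Spec_filas_ordenadas; infer_instance

-- ===== CLAIM (what is proved, stated in full; the proofs are below) =====
def Claim_equal_filas_ordenadas : Prop := ∀ (matriz : List (List Int)), Dom_filas_ordenadas matriz → Spec_filas_ordenadas matriz (filas_ordenadas matriz)

-- ===== LEMMAS AND PROOFS =====

-- "no adjacent descent along e :: l", the invariant A's inner pass computes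
def pvChk (e : Int) (l : List Int) : Bool :=
  match l with
  | [] => true
  | x :: t => !(decide (e > x)) && pvChk x t

theorem pvInnerFor_fst (lista : List Int) (orden : Bool) (e : Int) (i : Nat) :
    (pvInnerFor lista (orden, e, i)).1 = (orden && pvChk e lista) := by
  induction lista generalizing orden e i with
  | nil => simp [pvInnerFor, pvChk]
  | cons x t ih =>
    simp only [pvInnerFor, List.foldl] at ih ⊢
    rw [ih, pvChk]
    by_cases h : e > x <;> simp [h]

theorem pvChk_pairwise (e : Int) (l : List Int) :
    pvChk e l = true ↔ List.Pairwise (fun a b => a ≤ b) (e :: l) := by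
  induction l generalizing e with
  | nil => simp [pvChk]
  | cons x t ih =>
    rw [pvChk]
    constructor
    · intro h
      simp only [Bool.and_eq_true, Bool.not_eq_true', decide_eq_false_iff_not, not_lt] at h
      obtain ⟨hex, hc⟩ := h
      have hp := (ih x).mp hc
      refine List.pairwise_cons.mpr ⟨?_, hp⟩
      intro y hy
      rcases List.mem_cons.mp hy with rfl | hyt
      · exact hex
      · exact le_trans hex (List.rel_of_pairwise_cons hp hyt)
    · intro h
      have h1 := List.rel_of_pairwise_cons h (List.mem_cons_self)
      have h2 := (ih x).mpr (List.Pairwise.of_cons h)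
      simp [not_lt.mpr h1, h2]

theorem ordenados_eq_chk (x : Int) (t : List Int) :
    ordenados (x :: t) = pvChk x t := by
  have hlen : 0 < (x :: t).length := by simp
  rw [ordenados, pvWhileA, dif_pos hlen]
  have hidx := pvInnerFor_idx (x :: t) (true, x, 0)
  rw [pvWhileA, dif_neg (by omega)]
  rw [pvInnerFor_fst, pvChk]
  simp

theorem row_eq (f : List Int) :
    (PySem.List.sorted f (fun x => x) false == f) = ordenados f := by
  match f with
  | [] => decide
  | x :: t =>
    rw [ordenados_eq_chk]
    by_cases h : List.Pairwise (fun a b : Int => a ≤ b) (x :: t)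
    · rw [PySem.List.sorted_eq_self_of_pairwise _ _ h, (pvChk_pairwise x t).mpr h]
      simp
    · have hne : (PySem.List.sorted (x :: t) (fun x => x) false == x :: t) = false := by
        apply beq_eq_false_iff_ne.mpr
        intro heq
        have hp := PySem.List.sorted_pairwise (x :: t) (fun x => x)
        rw [heq] at hp
        exact h (by simpa using hp)
      have hc : pvChk x t = false := by
        cases hh : pvChk x t
        · rfl
        · exact absurd ((pvChk_pairwise x t).mp hh) h
      rw [hne, hc]

theorem foldl_eq_map (l : List (List Int)) (acc : List Bool) :
    l.foldl (fun acc f => acc ++ [if ordenados f then true else false]) acc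
      = acc ++ l.map (fun f => PySem.List.sorted f (fun x => x) false == f) := by
  induction l generalizing acc with
  | nil => simp
  | cons f t ih =>
    simp only [List.foldl, List.map_cons]
    rw [ih, row_eq f]
    by_cases h : ordenados f <;> simp [h]

-- ===== VERDICT (by name: the statement is the Claim_ definition above) =====
theorem filas_ordenadas_spec : Claim_equal_filas_ordenadas := by
  intro matriz _
  show filas_ordenadas matriz = filas_ordenadas_alt matriz
  unfold filas_ordenadas filas_ordenadas_alt
  simpa using foldl_eq_map matriz []
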